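-- pv_equiv track=rewrite | github.com/rbonvall/progra-utfsm | guias/2014-1/mayo-05/partidos/campeonato.py | calcular_tabla2
-- ===== SOURCE A (Python) =====
-- def calcular_tabla2(campeonato):
--     tabla = {}
--     for partido in campeonato:
--
--         # Desempaquetar equipos.
--         local, visita = partido
--
--         # Desempaquetar goles del partido.
--         gl, gv = campeonato[partido]
--
--         # Agregar al diccionario los equipos de este partido
--         # si es que aun no estan en el.
--         if local not in tabla:
--             tabla[local] = 0
--         if visita not in tabla:
--             tabla[visita] = 0
--
--         # Sumar los puntos dependiendo del resultado.
--         if gl > gv: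
--             tabla[local] += 3
--         elif gl < gv:
--             tabla[visita] += 3
--         else:
--             tabla[local] += 1
--             tabla[visita] += 1
--
--     return tabla
-- ===== SOURCE B (Python) =====
-- def calcular_tabla2(campeonato):
--     # Per-team aggregation: list teams in first-appearance order, then for each
--     # team scan all matches summing its points (3 per win, 1 per draw).
--     partidos = list(campeonato.items())
--     orden = []
--     for (local, visita), _ in partidos:
--         if local not in orden:
--             orden.append(local)
--         if visita not in orden:
--             orden.append(visita)
--     def puntos(t):
--         s = 0
--         for (local, visita), (gl, gv) in partidos:
--             if t == local:
--                 s += 3 if gl > gv else (1 if gl == gv else 0)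
--             if t == visita:
--                 s += 3 if gv > gl else (1 if gl == gv else 0)
--         return s
--     return {t: puntos(t) for t in orden}
-- ===== Notes on version B (the rewrite author's own statement) =====
-- stated objective: alternative
-- what changed: A's single interleaved per-match loop (membership-guarded zero insertion plus in-place point updates on a running dict) is replaced by per-team aggregation: one pass lists teams in first-appearance order, then for each team a full scan over the matches sums that team's points, with no mutable table at all.
import Mathlib
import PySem

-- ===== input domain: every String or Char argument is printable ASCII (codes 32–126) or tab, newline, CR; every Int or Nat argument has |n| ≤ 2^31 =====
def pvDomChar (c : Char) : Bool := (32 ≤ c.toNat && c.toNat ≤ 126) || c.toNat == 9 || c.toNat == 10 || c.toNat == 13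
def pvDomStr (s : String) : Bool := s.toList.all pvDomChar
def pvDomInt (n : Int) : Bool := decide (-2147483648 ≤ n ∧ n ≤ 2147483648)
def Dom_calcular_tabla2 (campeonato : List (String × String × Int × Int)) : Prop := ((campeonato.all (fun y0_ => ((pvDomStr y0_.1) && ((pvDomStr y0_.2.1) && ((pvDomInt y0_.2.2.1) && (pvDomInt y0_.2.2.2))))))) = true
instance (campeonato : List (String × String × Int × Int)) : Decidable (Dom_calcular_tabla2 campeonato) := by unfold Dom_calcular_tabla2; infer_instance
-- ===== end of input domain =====

-- B replaces A's single mutable-table loop by per-team aggregation (teams in first-appearance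
-- order, then per team a scan over all matches summing its points); objective: alternative.


-- ===== PORT A =====
-- campeonato is a Python dict {(local, visita): (gl, gv)}: rebuilt with Dict.ofList, iterated via items.
def calcular_tabla2 (campeonato : List (String × String × Int × Int)) : List (String × Int) :=
  let camp : PySem.Dict (String × String) (Int × Int) :=
    PySem.Dict.ofList (campeonato.map (fun e => ((e.1, e.2.1), e.2.2)))
  (camp.items.foldl (fun (tabla : PySem.Dict String Int) partido =>
      let l := partido.1.1
      let v := partido.1.2
      -- gl, gv = campeonato[partido]  (the key comes from the iteration, so it is present)
      let g := (camp.get? partido.1).getD (0, 0)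
      let tabla := if tabla.contains l then tabla else tabla.insert l 0
      let tabla := if tabla.contains v then tabla else tabla.insert v 0
      if g.1 > g.2 then tabla.modify l 0 (· + 3)
      else if g.1 < g.2 then tabla.modify v 0 (· + 3)
      else (tabla.modify l 0 (· + 1)).modify v 0 (· + 1))
    PySem.Dict.empty).items

-- ===== PORT B =====
def calcular_tabla2_alt (campeonato : List (String × String × Int × Int)) : List (String × Int) :=
  let camp : PySem.Dict (String × String) (Int × Int) :=
    PySem.Dict.ofList (campeonato.map (fun e => ((e.1, e.2.1), e.2.2)))
  let partidos := camp.items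
  -- orden: teams in first-appearance order
  let orden := partidos.foldl (fun (o : List String) it =>
      let o := if it.1.1 ∈ o then o else o ++ [it.1.1]
      if it.1.2 ∈ o then o else o ++ [it.1.2]) []
  -- puntos(t): scan all matches, summing this team's points
  let puntos := fun (t : String) => partidos.foldl (fun (s : Int) it =>
      let s := if t = it.1.1 then s + (if it.2.1 > it.2.2 then 3 else if it.2.1 = it.2.2 then 1 else 0) else s
      if t = it.1.2 then s + (if it.2.2 > it.2.1 then 3 else if it.2.1 = it.2.2 then 1 else 0) else s) 0
  orden.map (fun t => (t, puntos t))

-- ===== PRECONDITION & SPEC =====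
def Spec_calcular_tabla2 (campeonato : List (String × String × Int × Int)) (out : List (String × Int)) : Prop := out = calcular_tabla2_alt campeonato
instance (campeonato : List (String × String × Int × Int)) (out : List (String × Int)) : Decidable (Spec_calcular_tabla2 campeonato out) := by unfold Spec_calcular_tabla2; infer_instance

-- ===== CLAIM (what is proved, stated in full; the proofs are below) =====
def Claim_equal_calcular_tabla2 : Prop := ∀ (campeonato : List (String × String × Int × Int)), Dom_calcular_tabla2 campeonato → Spec_calcular_tabla2 campeonato (calcular_tabla2 campeonato)

-- ===== LEMMAS AND PROOFS =====

-- `pvAddK K k` = the key list after a (possibly redundant) first-appearance registration of k.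
def pvAddK (K : List String) (k : String) : List String :=
  if k ∈ K then K else K ++ [k]

lemma pv_mem_addK {K : List String} {t k : String} : t ∈ pvAddK K k ↔ t ∈ K ∨ t = k := by
  unfold pvAddK
  by_cases h : k ∈ K
  · simp only [if_pos h]
    constructor
    · exact Or.inl
    · rintro (h' | rfl) <;> assumption
  · simp [if_neg h]

lemma pv_addK_nodup {K : List String} (h : K.Nodup) (k : String) : (pvAddK K k).Nodup := by
  unfold pvAddK
  by_cases hk : k ∈ K <;> simp [List.nodup_append, hk, h]
  exact fun a ha hak => hk (hak ▸ ha)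

-- A's loop body once the dict lookup has been resolved to the iterated item's own value.
def pvStepA (d : PySem.Dict String Int) (it : (String × String) × (Int × Int)) : PySem.Dict String Int :=
  let l := it.1.1
  let v := it.1.2
  let d := if d.contains l then d else d.insert l 0
  let d := if d.contains v then d else d.insert v 0
  if it.2.1 > it.2.2 then d.modify l 0 (· + 3)
  else if it.2.1 < it.2.2 then d.modify v 0 (· + 3)
  else (d.modify l 0 (· + 1)).modify v 0 (· + 1)

-- B's two loop bodies, named (exactly the port's lambdas).
def pvStepO (o : List String) (it : (String × String) × (Int × Int)) : List String :=
  let o := if it.1.1 ∈ o then o else o ++ [it.1.1]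
  if it.1.2 ∈ o then o else o ++ [it.1.2]

def pvStepP (t : String) (s : Int) (it : (String × String) × (Int × Int)) : Int :=
  let s := if t = it.1.1 then s + (if it.2.1 > it.2.2 then 3 else if it.2.1 = it.2.2 then 1 else 0) else s
  if t = it.1.2 then s + (if it.2.2 > it.2.1 then 3 else if it.2.1 = it.2.2 then 1 else 0) else s

lemma pv_stepO_eq (o : List String) (it : (String × String) × (Int × Int)) :
    pvStepO o it = pvAddK (pvAddK o it.1.1) it.1.2 := rfl

def pvOrdenOf (L : List ((String × String) × (Int × Int))) : List String :=
  L.foldl pvStepO []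

def pvPtsOf (L : List ((String × String) × (Int × Int))) (t : String) : Int :=
  L.foldl (pvStepP t) 0

lemma pv_keys_of_items {d : PySem.Dict String Int} {K : List String} {p : String → Int}
    (hit : d.items = K.map (fun t => (t, p t))) : d.keys = K := by
  simp only [PySem.Dict.keys, hit, List.map_map]
  exact (List.map_congr_left (fun t _ => rfl)).trans (List.map_id K)

lemma pv_contains_of_items {d : PySem.Dict String Int} {K : List String} {p : String → Int}
    (hit : d.items = K.map (fun t => (t, p t))) (k : String) :
    d.contains k = decide (k ∈ K) := by
  rw [PySem.Dict.contains_eq_decide_mem_keys, pv_keys_of_items hit]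

-- the membership-guarded zero-insertion of A
lemma pv_step_insert {d : PySem.Dict String Int} {K : List String} {p : String → Int} {k : String}
    (hit : d.items = K.map (fun t => (t, p t))) (hp : k ∉ K → p k = 0) :
    (if d.contains k then d else d.insert k 0).items = (pvAddK K k).map (fun t => (t, p t)) := by
  unfold pvAddK
  by_cases hk : k ∈ K
  · simp [pv_contains_of_items hit, hk, hit]
  · have hc : d.contains k = false := by simp [pv_contains_of_items hit, hk]
    simp [hc, hk, PySem.Dict.items_insert_of_not_contains _ _ hc, hit, hp hk]

-- adding delta points at a key already present in the table
lemma pv_step_modify {d : PySem.Dict String Int} {K : List String} {p : String → Int} {k : String}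
    (delta : Int) (hK : K.Nodup) (hit : d.items = K.map (fun t => (t, p t))) (hk : k ∈ K) :
    (d.modify k 0 (· + delta)).items
      = K.map (fun t => (t, p t + if t = k then delta else 0)) := by
  have hkeys : d.keys = K := pv_keys_of_items hit
  have hnd : d.keys.Nodup := hkeys ▸ hK
  have hgetD : ∀ t ∈ K, d.getD t 0 = p t := by
    intro t ht
    exact PySem.Dict.getD_of_mem_items d (by rw [hit]; exact List.mem_map_of_mem ht) hnd 0
  have hc : d.contains k = true := by
    rw [PySem.Dict.contains_eq_decide_mem_keys, hkeys]; simpa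
  have hkeys' : (d.modify k 0 (· + delta)).keys = K := by
    rw [PySem.Dict.keys_modify, PySem.Dict.keys_insert_of_contains _ _ hc, hkeys]
  rw [PySem.Dict.items_eq_map_keys _ (hkeys' ▸ hK) 0, hkeys']
  apply List.map_congr_left
  intro t ht
  rw [PySem.Dict.getD_modify]
  by_cases htk : t = k
  · simp [htk, hgetD k hk]
  · simp [htk, hgetD t ht]

-- the loop invariant: A's table is B's team order paired with B's per-team point sums
lemma pv_inv (L : List ((String × String) × (Int × Int))) :
    (L.foldl pvStepA PySem.Dict.empty).items
        = (pvOrdenOf L).map (fun t => (t, pvPtsOf L t))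
    ∧ (pvOrdenOf L).Nodup
    ∧ ∀ t : String, t ∉ pvOrdenOf L → pvPtsOf L t = 0 := by
  induction L using List.reverseRecOn with
  | nil =>
    exact ⟨rfl, by simp [pvOrdenOf], fun t _ => rfl⟩
  | append_singleton L e ih =>
    obtain ⟨h1, h2, h3⟩ := ih
    have hO : pvOrdenOf (L ++ [e]) = pvStepO (pvOrdenOf L) e := by
      simp [pvOrdenOf]
    have hP : ∀ t, pvPtsOf (L ++ [e]) t = pvStepP t (pvPtsOf L t) e := by
      intro t; simp [pvPtsOf]
    simp only [List.foldl_append, List.foldl_cons, List.foldl_nil, hO, pv_stepO_eq]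
    set dA := L.foldl pvStepA PySem.Dict.empty with hdA
    set K := pvOrdenOf L with hKdef
    obtain ⟨⟨l, v⟩, gl, gv⟩ := e
    have hit1 := pv_step_insert h1 (h3 l)
    have hnd1 : (pvAddK K l).Nodup := pv_addK_nodup h2 l
    have hp1 : ∀ k, k ∉ pvAddK K l → pvPtsOf L k = 0 :=
      fun k hk => h3 k (fun h => hk (pv_mem_addK.mpr (Or.inl h)))
    have hit2 := pv_step_insert hit1 (hp1 v)
    have hnd2 : (pvAddK (pvAddK K l) v).Nodup := pv_addK_nodup hnd1 v
    have hp2 : ∀ k, k ∉ pvAddK (pvAddK K l) v → pvPtsOf L k = 0 :=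
      fun k hk => hp1 k (fun h => hk (pv_mem_addK.mpr (Or.inl h)))
    have hl2 : l ∈ pvAddK (pvAddK K l) v :=
      pv_mem_addK.mpr (Or.inl (pv_mem_addK.mpr (Or.inr rfl)))
    have hv2 : v ∈ pvAddK (pvAddK K l) v := pv_mem_addK.mpr (Or.inr rfl)
    refine ⟨?_, hnd2, ?_⟩
    · simp only [pvStepA]
      by_cases hgt : gl > gv
      · simp only [if_pos hgt]
        rw [pv_step_modify 3 hnd2 hit2 hl2]
        apply List.map_congr_left
        intro t _
        rw [hP t]
        refine congrArg (Prod.mk t) ?_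
        simp only [pvStepP]
        split_ifs <;> omega
      · by_cases hlt : gl < gv
        · simp only [if_neg hgt, if_pos hlt]
          rw [pv_step_modify 3 hnd2 hit2 hv2]
          apply List.map_congr_left
          intro t _
          rw [hP t]
          refine congrArg (Prod.mk t) ?_
          simp only [pvStepP]
          split_ifs <;> omega
        · have heq : gl = gv := le_antisymm (not_lt.mp hgt) (not_lt.mp hlt)
          simp only [if_neg hgt, if_neg hlt]
          rw [pv_step_modify 1 hnd2 (pv_step_modify 1 hnd2 hit2 hl2) hv2]
          apply List.map_congr_left
          intro t _
          rw [hP t]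
          refine congrArg (Prod.mk t) ?_
          simp only [pvStepP]
          split_ifs <;> omega
    · intro t ht
      rw [hP t]
      have htl : t ≠ l := fun h => (pv_stepO_eq K ((l,v),(gl,gv)) ▸ ht) (h ▸ hl2)
      have htv : t ≠ v := fun h => (pv_stepO_eq K ((l,v),(gl,gv)) ▸ ht) (h ▸ hv2)
      have ht0 : pvPtsOf L t = 0 :=
        h3 t (fun h => (pv_stepO_eq K ((l,v),(gl,gv)) ▸ ht) (pv_mem_addK.mpr (Or.inl (pv_mem_addK.mpr (Or.inl h)))))
      simp [pvStepP, htl, htv, ht0]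

-- ===== VERDICT (by name: the statement is the Claim_ definition above) =====
theorem calcular_tabla2_spec : Claim_equal_calcular_tabla2 := by
  intro campeonato _
  unfold Spec_calcular_tabla2 calcular_tabla2 calcular_tabla2_alt
  dsimp only
  set camp : PySem.Dict (String × String) (Int × Int) :=
    PySem.Dict.ofList (campeonato.map (fun e => ((e.1, e.2.1), e.2.2))) with hcamp
  rw [PySem.List.foldl_congr_mem camp.items _ pvStepA PySem.Dict.empty ?_]
  · exact (pv_inv camp.items).1
  · intro acc it hit
    have hget : camp.get? it.1 = some it.2 :=
      PySem.Dict.get?_of_mem_items camp (by simpa using hit) (PySem.Dict.nodup_keys_ofList _)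
    simp [pvStepA, hget]
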